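-- pv_equiv track=rewrite | github.com/atr777/nba-elo | src/predictors/season_predictor.py | _get_playoff_teams
-- ===== SOURCE A (Python) =====
-- from typing import Dict, List, Optional
--
-- def _get_playoff_teams(standings: Dict) -> Dict[str, List[int]]:
--     """
--     Determine which teams make playoffs based on standings.
--
--     Top 6 seeds get direct playoff berth.
--     Seeds 7-10 go to play-in tournament.
--
--     Args:
--         standings: Final standings for this simulation
--
--     Returns:
--         {
--             'east_playoffs': [team_ids for top 10 East teams],
--             'west_playoffs': [team_ids for top 10 West teams]
--         }
--     """
--     # TODO: Need conference mapping - for now use hardcoded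
--     # East: Teams 1-15 (approximately)
--     # West: Teams 16-30 (approximately)
--
--     # This is a simplified version - will need actual conference data
--     east_team_ids = [1, 2, 3, 4, 5, 6, 7, 8, 9, 10, 11, 12, 13, 14, 15]
--     west_team_ids = [16, 17, 18, 19, 20, 21, 22, 23, 24, 25, 26, 27, 28, 29, 30]
--
--     # Filter standings to each conference
--     east_teams = [(tid, standings[tid]) for tid in standings if tid in east_team_ids]
--     west_teams = [(tid, standings[tid]) for tid in standings if tid in west_team_ids]
--
--     # Sort by wins (with tiebreaker using team_id for consistency)
--     east_sorted = sorted(east_teams, key=lambda x: (x[1]['wins'], -x[0]), reverse=True)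
--     west_sorted = sorted(west_teams, key=lambda x: (x[1]['wins'], -x[0]), reverse=True)
--
--     # Top 10 per conference
--     east_playoffs = [team_id for team_id, _ in east_sorted[:10]]
--     west_playoffs = [team_id for team_id, _ in west_sorted[:10]]
--
--     return {
--         'east_playoffs': east_playoffs,
--         'west_playoffs': west_playoffs
--     }
-- ===== SOURCE B (Python) =====
-- from typing import Dict, List, Optional
--
-- def _get_playoff_teams(standings: Dict) -> Dict[str, List[int]]:
--     """Single combined sort, then partition by conference (alternative decomposition)."""
--     ranked = sorted(
--         ((tid, info) for tid, info in standings.items() if 1 <= tid <= 30),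
--         key=lambda x: (x[1]['wins'], -x[0]),
--         reverse=True,
--     )
--     east = [tid for tid, _ in ranked if tid <= 15]
--     west = [tid for tid, _ in ranked if tid >= 16]
--     return {'east_playoffs': east[:10], 'west_playoffs': west[:10]}
-- ===== Notes on version B (the rewrite author's own statement) =====
-- stated objective: alternative
-- what changed: A filters each conference separately and runs two independent sorts, slicing each; B performs one combined sort of all 1..30 teams under the same (wins, -tid) key and then partitions the ranked list into east/west, taking the first 10 of each.
import Mathlib
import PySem

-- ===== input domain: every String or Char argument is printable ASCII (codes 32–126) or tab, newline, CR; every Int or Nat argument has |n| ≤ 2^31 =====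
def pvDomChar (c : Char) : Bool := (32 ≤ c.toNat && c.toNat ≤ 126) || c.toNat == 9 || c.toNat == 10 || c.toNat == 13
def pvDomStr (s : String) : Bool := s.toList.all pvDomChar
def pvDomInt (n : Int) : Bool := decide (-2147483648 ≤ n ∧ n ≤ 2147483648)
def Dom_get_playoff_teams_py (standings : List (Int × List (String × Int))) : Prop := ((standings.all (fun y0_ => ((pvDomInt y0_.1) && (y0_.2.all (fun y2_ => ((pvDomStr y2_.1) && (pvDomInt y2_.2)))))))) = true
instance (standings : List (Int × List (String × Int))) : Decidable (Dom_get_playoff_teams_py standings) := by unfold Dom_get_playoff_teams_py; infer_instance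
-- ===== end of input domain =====

-- B replaces A's two per-conference sorts (filter, sort, slice, extract — twice) by ONE combined
-- sort of the 1..30 teams followed by a partition into east/west; same return value (alternative
-- decomposition, not claimed faster).

-- x[1]['wins'] : the inner dict lookup (0 is never used inside Pre_, where 'wins' is present)
def winsOf (info : List (String × Int)) : Int :=
  ((PySem.Dict.ofList info).get? "wins").getD 0

-- ===== PORT A =====
def get_playoff_teams_py (standings : List (Int × List (String × Int))) : List (String × List Int) :=
  let east_team_ids : List Int := [1,2,3,4,5,6,7,8,9,10,11,12,13,14,15]
  let west_team_ids : List Int := [16,17,18,19,20,21,22,23,24,25,26,27,28,29,30]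
  let d := PySem.Dict.ofList standings
  let east_teams := (d.keys.filter (fun tid => decide (tid ∈ east_team_ids))).map (fun tid => (tid, d.getD tid []))
  let west_teams := (d.keys.filter (fun tid => decide (tid ∈ west_team_ids))).map (fun tid => (tid, d.getD tid []))
  let east_sorted := PySem.List.sorted2 east_teams (fun x => winsOf x.2) (fun x => -x.1) true
  let west_sorted := PySem.List.sorted2 west_teams (fun x => winsOf x.2) (fun x => -x.1) true
  let east_playoffs := (PySem.List.slice east_sorted none (some 10)).map (·.1)
  let west_playoffs := (PySem.List.slice west_sorted none (some 10)).map (·.1)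
  [("east_playoffs", east_playoffs), ("west_playoffs", west_playoffs)]

-- ===== PORT B =====
def get_playoff_teams_py_alt (standings : List (Int × List (String × Int))) : List (String × List Int) :=
  let d := PySem.Dict.ofList standings
  let ranked := PySem.List.sorted2 (d.items.filter (fun p => decide (1 ≤ p.1 ∧ p.1 ≤ 30)))
      (fun x => winsOf x.2) (fun x => -x.1) true
  let east := (ranked.filter (fun p => decide (p.1 ≤ 15))).map (·.1)
  let west := (ranked.filter (fun p => decide (16 ≤ p.1))).map (·.1)
  [("east_playoffs", PySem.List.slice east none (some 10)),
   ("west_playoffs", PySem.List.slice west none (some 10))]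

-- ===== PRECONDITION & SPEC =====
-- Pre_ excludes exactly the inputs on which Python A raises KeyError: a team with id 1..30 whose
-- record dict lacks the key 'wins'.
def Pre_get_playoff_teams_py (standings : List (Int × List (String × Int))) : Prop :=
  ∀ tid ∈ (PySem.Dict.ofList standings).keys, 1 ≤ tid → tid ≤ 30 →
    (PySem.Dict.ofList ((PySem.Dict.ofList standings).getD tid [])).contains "wins" = true
instance (standings : List (Int × List (String × Int))) : Decidable (Pre_get_playoff_teams_py standings) := by unfold Pre_get_playoff_teams_py; infer_instance

def pvWitness_get_playoff_teams_py : (List (Int × List (String × Int))) :=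
  [(1, [("wins", 41)]), (2, [("wins", 41), ("losses", 41)]), (20, [("wins", 3)]), (40, [])]

def Spec_get_playoff_teams_py (standings : List (Int × List (String × Int))) (out : List (String × List Int)) : Prop := out = get_playoff_teams_py_alt standings
instance (standings : List (Int × List (String × Int))) (out : List (String × List Int)) : Decidable (Spec_get_playoff_teams_py standings out) := by unfold Spec_get_playoff_teams_py; infer_instance

-- ===== CLAIM (what is proved, stated in full; the proofs are below) =====
def Claim_equal_get_playoff_teams_py : Prop := ∀ (standings : List (Int × List (String × Int))), Dom_get_playoff_teams_py standings → Pre_get_playoff_teams_py standings → Spec_get_playoff_teams_py standings (get_playoff_teams_py standings)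

-- ===== LEMMAS AND PROOFS =====

-- sorted2 with two Int keys is sorted under the lexicographic key
theorem sorted2_eq_sorted_lex {α : Type} (xs : List α) (k1 k2 : α → Int) (rev : Bool) :
    PySem.List.sorted2 xs k1 k2 rev = PySem.List.sorted xs (fun x => toLex (k1 x, k2 x)) rev := by
  unfold PySem.List.sorted2 PySem.List.sorted
  have h : (fun (a b : α) => decide (k1 a < k1 b) || !decide (k1 b < k1 a) && decide (k2 a < k2 b))
      = fun a b => decide (toLex (k1 a, k2 a) < toLex (k1 b, k2 b)) := by
    funext a b
    rw [Bool.eq_iff_iff]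
    simp [Prod.Lex.lt_iff]
    omega
  rw [h]

-- filtering commutes with a reverse sort whose key is injective on the list
theorem filter_sorted_rev_comm {α κ : Type} [LinearOrder κ] (xs : List α) (key : α → κ)
    (p : α → Bool) (hne : xs.Pairwise (fun a b => key a ≠ key b)) :
    (PySem.List.sorted xs key true).filter p = PySem.List.sorted (xs.filter p) key true := by
  have hperm : ((PySem.List.sorted xs key true).filter p).Perm (xs.filter p) :=
    (PySem.List.sorted_perm xs key true).filter p
  have hle : (PySem.List.sorted xs key true).Pairwise (fun a b => key b ≤ key a) :=
    PySem.List.sorted_pairwise_rev xs key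
  have hne' : (PySem.List.sorted xs key true).Pairwise (fun a b => key a ≠ key b) := by
    exact ((PySem.List.sorted_perm xs key true).pairwise_iff (fun {a b} h => h.symm)).mpr hne
  have hgt : (PySem.List.sorted xs key true).Pairwise (fun a b => key b < key a) :=
    (hle.and hne').imp (fun h => lt_of_le_of_ne h.1 h.2.symm)
  exact (PySem.List.sorted_rev_eq_of_perm_of_pairwise_gt _ _ _ hperm (hgt.filter p)).symm

-- the composite lex key is injective wherever team ids differ
theorem pairwise_key_ne (xs : List (Int × List (String × Int))) (h : xs.Pairwise (fun a b => a.1 ≠ b.1)) :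
    xs.Pairwise (fun a b => (fun x : Int × List (String × Int) => toLex (winsOf x.2, -x.1)) a
      ≠ (fun x : Int × List (String × Int) => toLex (winsOf x.2, -x.1)) b) := by
  refine h.imp ?_
  intro a b hab hk
  apply hab
  have := congrArg (fun y => (ofLex y).2) hk
  simpa using this

-- items of a dict carry pairwise-distinct keys
theorem items_pairwise_fst_ne (standings : List (Int × List (String × Int))) :
    (PySem.Dict.ofList standings).items.Pairwise (fun a b => a.1 ≠ b.1) := by
  have h := PySem.Dict.nodup_keys_ofList (κ := Int) (ν := List (String × Int)) standings
  simpa [PySem.Dict.keys, List.nodup_iff_pairwise_ne, List.pairwise_map] using h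

-- A's conference list is a filter of the dict's items
theorem conf_teams_eq_filter (standings : List (Int × List (String × Int))) (q : Int → Bool) :
    ((PySem.Dict.ofList standings).keys.filter (fun tid => q tid)).map
        (fun tid => (tid, (PySem.Dict.ofList standings).getD tid []))
      = (PySem.Dict.ofList standings).items.filter (fun p => q p.1) := by
  rw [PySem.Dict.items_eq_map_keys _ (PySem.Dict.nodup_keys_ofList standings) []]
  rw [List.filter_map]
  rfl

-- xs[:10] is take 10
theorem slice_ten {α : Type} (l : List α) : PySem.List.slice l none (some 10) = l.take 10 := by
  simpa using PySem.List.slice_to_natCast l 10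

-- B's conference column equals A's conference column
theorem conf_eq (standings : List (Int × List (String × Int))) (q : Int → Bool) (eids : List Int)
    (hpt : ∀ x : Int, (q x && decide (1 ≤ x ∧ x ≤ 30)) = decide (x ∈ eids)) :
    PySem.List.slice
      (((PySem.List.sorted2 ((PySem.Dict.ofList standings).items.filter (fun p => decide (1 ≤ p.1 ∧ p.1 ≤ 30)))
          (fun x => winsOf x.2) (fun x => -x.1) true).filter (fun p => q p.1)).map (·.1)) none (some 10)
    = (PySem.List.slice (PySem.List.sorted2
        (((PySem.Dict.ofList standings).keys.filter (fun tid => decide (tid ∈ eids))).map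
          (fun tid => (tid, (PySem.Dict.ofList standings).getD tid [])))
        (fun x => winsOf x.2) (fun x => -x.1) true) none (some 10)).map (·.1) := by
  rw [conf_teams_eq_filter, sorted2_eq_sorted_lex, sorted2_eq_sorted_lex]
  rw [filter_sorted_rev_comm _ _ _
    (List.Pairwise.sublist List.filter_sublist (pairwise_key_ne _ (items_pairwise_fst_ne standings)))]
  rw [List.filter_filter]
  rw [List.filter_congr (fun x _ => hpt x.1)]
  rw [slice_ten, slice_ten, List.map_take]

theorem get_playoff_teams_py_spec : Claim_equal_get_playoff_teams_py := by
  intro standings _ _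
  unfold Spec_get_playoff_teams_py get_playoff_teams_py get_playoff_teams_py_alt
  simp only
  rw [conf_eq standings (fun x => decide (x ≤ 15)) [1,2,3,4,5,6,7,8,9,10,11,12,13,14,15]
        (fun x => by rw [Bool.eq_iff_iff]; simp; omega),
      conf_eq standings (fun x => decide (16 ≤ x)) [16,17,18,19,20,21,22,23,24,25,26,27,28,29,30]
        (fun x => by rw [Bool.eq_iff_iff]; simp; omega)]

-- ===== VERDICT (by name: the statement is the Claim_ definition above) =====
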